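-- pv_equiv track=rewrite | github.com/cyberkrunk/composing2025 | cjcomp.py | pseg_invert
-- ===== SOURCE A (Python) =====
-- def pseg_invert(my_pseg: list[int]) -> list[int]:
--     """
--     Invert a pseg
--
--     :param my_pseg: pseg
--     """
--     # create an interval list
--     pseg_size = len(my_pseg)
--     interval_list = [
--         0,
--     ]
--     for i in range(pseg_size - 1):
--         pseg_interval = my_pseg[i + 1] - my_pseg[i]
--         interval_list.append(pseg_interval)
--
--     # invert the interval list
--     interval_list_inverted = [interval * -1 for interval in interval_list]
--
--     # create the inverted pseg
--     pseg_inverted = [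
--         my_pseg[0],
--     ]  # the starting pitch
--     for i in range(1, pseg_size):
--         p = pseg_inverted[i - 1] + interval_list_inverted[i]
--         pseg_inverted.append(p)
--     return pseg_inverted
-- ===== SOURCE B (Python) =====
-- def pseg_invert(my_pseg: list[int]) -> list[int]:
--     """
--     Invert a pseg
--
--     :param my_pseg: pseg
--     """
--     first = my_pseg[0]
--     return [2 * first - x for x in my_pseg]
-- ===== Notes on version B (the rewrite author's own statement) =====
-- stated objective: simpler
-- what changed: Replaces the interval-list construction and the accumulating re-synthesis loop with the closed form 2*first - x applied directly to each pitch.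
import Mathlib
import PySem

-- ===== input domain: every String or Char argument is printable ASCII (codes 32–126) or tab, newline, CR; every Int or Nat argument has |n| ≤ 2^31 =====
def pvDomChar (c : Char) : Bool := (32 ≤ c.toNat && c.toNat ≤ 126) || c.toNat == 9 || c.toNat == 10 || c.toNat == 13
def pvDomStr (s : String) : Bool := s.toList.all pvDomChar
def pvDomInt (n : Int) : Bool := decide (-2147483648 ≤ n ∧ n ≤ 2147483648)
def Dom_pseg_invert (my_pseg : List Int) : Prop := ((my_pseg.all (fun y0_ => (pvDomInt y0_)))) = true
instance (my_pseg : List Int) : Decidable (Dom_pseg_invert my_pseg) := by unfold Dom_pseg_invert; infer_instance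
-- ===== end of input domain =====

-- B replaces A's interval-list construction and accumulating re-synthesis loop with the
-- closed form 2*first - x applied to each pitch (simpler, single pass).

-- ===== PORT A =====
def pseg_invert (my_pseg : List Int) : List Int :=
  let pseg_size : Int := my_pseg.length
  let interval_list : List Int :=
    (PySem.List.pyRange 0 (pseg_size - 1)).foldl
      (fun acc i =>
        acc ++ [PySem.List.pyGetD my_pseg (i + 1) 0 - PySem.List.pyGetD my_pseg i 0])
      [0]
  let interval_list_inverted : List Int := interval_list.map (fun interval => interval * (-1))
  (PySem.List.pyRange 1 pseg_size).foldl
    (fun acc i =>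
      acc ++ [PySem.List.pyGetD acc (i - 1) 0 + PySem.List.pyGetD interval_list_inverted i 0])
    [PySem.List.pyGetD my_pseg 0 0]

-- ===== PORT B =====
def pseg_invert_alt (my_pseg : List Int) : List Int :=
  let first := PySem.List.pyGetD my_pseg 0 0
  my_pseg.map (fun x => 2 * first - x)

-- ===== PRECONDITION & SPEC =====
-- A raises IndexError (my_pseg[0]) on the empty list; Pre_ excludes exactly that input.
def Pre_pseg_invert (my_pseg : List Int) : Prop := my_pseg ≠ []
instance (my_pseg : List Int) : Decidable (Pre_pseg_invert my_pseg) := by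
  unfold Pre_pseg_invert; infer_instance
def pvWitness_pseg_invert : List Int := [60, 64, 67]
def Spec_pseg_invert (my_pseg : List Int) (out : List Int) : Prop := out = pseg_invert_alt my_pseg
instance (my_pseg : List Int) (out : List Int) : Decidable (Spec_pseg_invert my_pseg out) := by
  unfold Spec_pseg_invert; infer_instance

-- ===== CLAIM (what is proved, stated in full; the proofs are below) =====
def Claim_equal_pseg_invert : Prop := ∀ (my_pseg : List Int), Dom_pseg_invert my_pseg → Pre_pseg_invert my_pseg → Spec_pseg_invert my_pseg (pseg_invert my_pseg)

-- ===== LEMMAS AND PROOFS =====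

-- the inverted interval list of A, computed for p :: t
lemma interval_list_eq (p : Int) (t : List Int) :
    ((PySem.List.pyRange 0 (((p :: t).length : Int) - 1)).foldl
      (fun acc i =>
        acc ++ [PySem.List.pyGetD (p :: t) (i + 1) 0 - PySem.List.pyGetD (p :: t) i 0])
      [0]) =
    0 :: (List.range t.length).map
      (fun j => (p :: t).getD (j + 1) 0 - (p :: t).getD j 0) := by
  have h : (((p :: t).length : Int) - 1) = (t.length : Int) := by
    push_cast [List.length_cons]; ring
  rw [h, PySem.List.pyRange_zero_natCast, List.foldl_map,
    PySem.List.foldl_append_singleton_eq_map (f := fun (k : Nat) =>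
      PySem.List.pyGetD (p :: t) ((k : Int) + 1) 0 - PySem.List.pyGetD (p :: t) (k : Int) 0)]
  simp only [List.cons_append, List.nil_append]
  congr 1
  apply List.map_congr_left
  intro k _
  have hc : ((k : Int) + 1) = ((k + 1 : Nat) : Int) := by push_cast; ring
  rw [hc, PySem.List.pyGetD_natCast, PySem.List.pyGetD_natCast]

-- the second loop of A, unfolded to the closed form, by induction on the trip count
lemma loop_eq (p : Int) (t : List Int) (inv : List Int)
    (hinv : ∀ j : Nat, j < t.length →
      PySem.List.pyGetD inv ((j : Int) + 1) 0 = (p :: t).getD j 0 - (p :: t).getD (j + 1) 0)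
    (k : Nat) (hk : k ≤ t.length) :
    ((PySem.List.pyRange 1 ((k : Int) + 1)).foldl
      (fun acc i =>
        acc ++ [PySem.List.pyGetD acc (i - 1) 0 + PySem.List.pyGetD inv i 0])
      [p]) =
    (List.range (k + 1)).map (fun j => 2 * p - (p :: t).getD j 0) := by
  induction k with
  | zero =>
    simp [PySem.List.pyRange]
    omega
  | succ k ih =>
    have hk' : k ≤ t.length := Nat.le_of_succ_le hk
    have hcast : (((k + 1 : Nat) : Int) + 1) = ((k : Int) + 1) + 1 := by push_cast; ring
    rw [hcast, PySem.List.pyRange_one_succ_right (by omega : (1 : Int) ≤ (k : Int) + 1),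
      List.foldl_append, ih hk']
    simp only [List.foldl_cons, List.foldl_nil]
    have hidx : ((k : Int) + 1 - 1) = (k : Int) := by ring
    rw [hidx, PySem.List.pyGetD_natCast, PySem.List.getD_map_range _ _ _ _ (by omega),
      hinv k (by omega)]
    rw [List.range_succ (n := k + 1), List.map_append]
    simp only [List.map_cons, List.map_nil]
    congr 2
    ring

lemma pseg_invert_eq_alt (p : Int) (t : List Int) :
    pseg_invert (p :: t) = pseg_invert_alt (p :: t) := by
  unfold pseg_invert pseg_invert_alt
  simp only []
  rw [interval_list_eq p t]
  have h0 : PySem.List.pyGetD (p :: t) 0 0 = p := by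
    simp [PySem.List.pyGetD]
  rw [h0]
  have hlen : ((p :: t).length : Int) = ((t.length + 1 : Nat) : Int) := by
    simp [List.length_cons]
  rw [hlen]
  have hcast : (((t.length + 1 : Nat) : Int)) = ((t.length : Int) + 1) := by push_cast; ring
  rw [hcast]
  have hinv : ∀ j : Nat, j < t.length →
      PySem.List.pyGetD ((0 :: (List.range t.length).map
        (fun j => (p :: t).getD (j + 1) 0 - (p :: t).getD j 0)).map
          (fun interval => interval * (-1))) ((j : Int) + 1) 0 =
      (p :: t).getD j 0 - (p :: t).getD (j + 1) 0 := by
    intro j hj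
    have hc : ((j : Int) + 1) = ((j + 1 : Nat) : Int) := by push_cast; ring
    rw [hc, PySem.List.pyGetD_natCast, List.map_cons, List.getD_cons_succ, List.map_map,
      PySem.List.getD_map_range _ _ _ _ (by omega : j < t.length)]
    simp only [Function.comp_apply]
    ring
  rw [loop_eq p t _ hinv t.length (le_refl _)]
  -- (List.range (t.length + 1)).map (fun j => 2*p - (p::t).getD j 0) = (p::t).map (2*p - ·)
  apply List.ext_getElem
  · simp
  · intro i h1 h2
    simp only [List.getElem_map, List.getElem_range]
    rw [List.getD_eq_getElem _ _ (by simpa using h2)]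

-- ===== VERDICT (by name: the statement is the Claim_ definition above) =====
theorem pseg_invert_spec : Claim_equal_pseg_invert := by
  intro my_pseg _ hpre
  unfold Spec_pseg_invert
  cases my_pseg with
  | nil => exact absurd rfl hpre
  | cons p t => exact pseg_invert_eq_alt p t
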